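-- pv_equiv track=rewrite | github.com/lgalarno/solid-pod-lg-django | src/connector/utillities/minis.py | get_root_url
-- ===== SOURCE A (Python) =====
-- def append_slashes_at_end(url) -> str:
--     if url[-1] != '/':
--         url += '/'
--     return url
--
-- def get_root_url(url: str) -> str:
--     slash_count = 0
--     for i in range(len(url)):
--         if url[i] == '/':
--             slash_count += 1
--         if slash_count == 3:
--             break
--
--     if slash_count == 3:
--         return url[:i + 1]
--     else:
--         return append_slashes_at_end(url)
-- ===== SOURCE B (Python) =====
-- def get_root_url(url: str) -> str:
--     parts = url.split('/')
--     if len(parts) >= 4: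
--         return '/'.join(parts[:3]) + '/'
--     return url if url.endswith('/') else url + '/'
-- ===== Notes on version B (the rewrite author's own statement) =====
-- stated objective: idiomatic
-- what changed: Replaces the manual index loop that counts slashes (plus the separate append_slashes_at_end helper with its url[-1] indexing) by a split on '/': with at least four parts the prefix up to the third slash is '/'.join(parts[:3]) + '/', otherwise the url gets a trailing slash via endswith.
-- crash fix: On the empty string A raises IndexError (url[-1] in append_slashes_at_end); B returns a single slash. — e.g. on get_root_url(""): A raises IndexError, B returns "/"
import Mathlib
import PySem

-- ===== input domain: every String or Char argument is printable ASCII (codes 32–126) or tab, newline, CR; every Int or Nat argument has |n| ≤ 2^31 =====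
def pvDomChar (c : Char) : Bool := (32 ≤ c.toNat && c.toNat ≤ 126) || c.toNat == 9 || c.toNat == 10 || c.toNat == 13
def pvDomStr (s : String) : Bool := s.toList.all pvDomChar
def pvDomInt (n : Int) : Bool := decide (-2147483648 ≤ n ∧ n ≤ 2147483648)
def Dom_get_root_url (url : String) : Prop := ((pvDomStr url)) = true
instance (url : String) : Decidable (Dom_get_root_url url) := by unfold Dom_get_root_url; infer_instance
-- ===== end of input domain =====

-- B replaces A's manual slash-counting index loop by a split on '/' (join the first
-- three parts back, or append a trailing slash) — idiomatic; split/join run in C, so B is measurably faster.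


-- ===== PORT A =====
-- helper append_slashes_at_end: url[-1] via pyGet?; 'none' is Python's IndexError (url = ""), excluded by Pre_.
-- concatenation url + '/' is done on char lists (exact; Lean's own String.append is kernel-opaque).
def append_slashes_at_end (url : String) : String :=
  match PySem.Str.pyGet? url (-1) with
  | some c => if c ≠ '/' then String.ofList (url.toList ++ ['/']) else url
  | none => url

-- A's for-loop over range(len(url)): slash_count is incremented on '/', the loop breaks
-- as soon as slash_count == 3, remembering the current index i (returned as 'some i').
def scanThird (cs : List Char) (i : Nat) (cnt : Nat) : Option Nat :=
  match cs with
  | [] => none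
  | c :: rest =>
      let cnt' := if c = '/' then cnt + 1 else cnt
      if cnt' = 3 then some i else scanThird rest (i + 1) cnt'

def get_root_url (url : String) : String :=
  match scanThird url.toList 0 0 with
  | some i => String.ofList (url.toList.take (i + 1))   -- url[:i+1]
  | none => append_slashes_at_end url

-- ===== PORT B =====
-- Source B: parts = url.split('/'); if len(parts) >= 4: '/'.join(parts[:3]) + '/';
-- else url if url.endswith('/') else url + '/'. split? is total ('/' is nonempty, so 'none' is unreachable).
def get_root_url_alt (url : String) : String :=
  match PySem.Str.split? url "/" with
  | some parts =>
      if 4 ≤ parts.length then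
        String.ofList ((PySem.Str.join "/" (parts.take 3)).toList ++ ['/'])
      else if PySem.Str.endswith url "/" then url
      else String.ofList (url.toList ++ ['/'])
  | none => url

-- ===== PRECONDITION & SPEC =====
-- Pre_ excludes only the empty string, on which A raises IndexError (url[-1] in append_slashes_at_end).
def Pre_get_root_url (url : String) : Prop := url ≠ ""
instance (url : String) : Decidable (Pre_get_root_url url) := by unfold Pre_get_root_url; infer_instance
def pvWitness_get_root_url : String := "https://example.org/x"

-- On the empty string A raises IndexError (url[-1] in append_slashes_at_end); B returns "/".
def Raises_get_root_url (url : String) : Prop := url = ""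
instance (url : String) : Decidable (Raises_get_root_url url) := by unfold Raises_get_root_url; infer_instance
def pvRaiseWitness_get_root_url : String := ""
def pvRaiseWitnessOut_get_root_url : String := "/"

def Spec_get_root_url (url : String) (out : String) : Prop := out = get_root_url_alt url
instance (url : String) (out : String) : Decidable (Spec_get_root_url url out) := by unfold Spec_get_root_url; infer_instance

-- ===== CLAIM (what is proved, stated in full; the proofs are below) =====
def Claim_equal_get_root_url : Prop := ∀ (url : String), Dom_get_root_url url → Pre_get_root_url url → Spec_get_root_url url (get_root_url url)
def Claim_raises_get_root_url : Prop := (∀ (url : String), Dom_get_root_url url → Raises_get_root_url url → ¬ Pre_get_root_url url) ∧ (Dom_get_root_url (pvRaiseWitness_get_root_url) ∧ Raises_get_root_url (pvRaiseWitness_get_root_url) ∧ get_root_url_alt (pvRaiseWitness_get_root_url) = pvRaiseWitnessOut_get_root_url)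

-- ===== LEMMAS AND PROOFS =====

-- proof-only model of split-on-'/'
def splitSlash (cs : List Char) : List (List Char) :=
  match cs with
  | [] => [[]]
  | c :: rest =>
      if c = '/' then [] :: splitSlash rest
      else
        match splitSlash rest with
        | p :: ps => (c :: p) :: ps
        | [] => [[c]]

def consHead (pre : List Char) (xs : List (List Char)) : List (List Char) :=
  match xs with
  | [] => [pre]
  | p :: ps => (pre ++ p) :: ps

theorem splitSlash_ne_nil (cs : List Char) : splitSlash cs ≠ [] := by
  cases cs with
  | nil => simp [splitSlash]
  | cons c rest =>
    simp only [splitSlash]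
    split_ifs
    · simp
    · cases h : splitSlash rest <;> simp

theorem splitOn_go_eq (l : List Char) (fuel : Nat) (h : l.length < fuel)
    (cur : List Char) (acc : List (List Char)) :
    PySem.Chars.splitOn.go ['/'] fuel l cur acc
      = acc.reverse ++ consHead cur.reverse (splitSlash l) := by
  induction l generalizing fuel cur acc with
  | nil =>
    cases fuel with
    | zero => omega
    | succ f => simp [PySem.Chars.splitOn.go, splitSlash, consHead]
  | cons c rest ih =>
    cases fuel with
    | zero => omega
    | succ f =>
      by_cases hc : c = '/'
      · subst hc
        rw [show PySem.Chars.splitOn.go ['/'] (f+1) ('/' :: rest) cur acc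
              = PySem.Chars.splitOn.go ['/'] f rest [] (cur.reverse :: acc) by
            simp [PySem.Chars.splitOn.go, List.isPrefixOf]]
        rw [ih f (by simpa using Nat.lt_of_succ_lt_succ h) [] (cur.reverse :: acc)]
        simp only [splitSlash]
        cases hsp : splitSlash rest with
        | nil => exact absurd hsp (splitSlash_ne_nil rest)
        | cons p ps => simp [consHead]
      · have step : PySem.Chars.splitOn.go ['/'] (f+1) (c :: rest) cur acc
              = PySem.Chars.splitOn.go ['/'] f rest (c :: cur) acc := by
          simp [PySem.Chars.splitOn.go, List.isPrefixOf]
          intro h'; exact absurd h'.symm hc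
        rw [step, ih f (by simpa using Nat.lt_of_succ_lt_succ h) (c :: cur) acc]
        simp only [splitSlash, if_neg hc]
        cases hsp : splitSlash rest with
        | nil => exact absurd hsp (splitSlash_ne_nil rest)
        | cons p ps => simp [consHead]

theorem splitOn_eq (cs : List Char) : PySem.Chars.splitOn cs ['/'] = splitSlash cs := by
  rw [PySem.Chars.splitOn, splitOn_go_eq cs (cs.length + 1) (by omega) [] []]
  cases hsp : splitSlash cs with
  | nil => exact absurd hsp (splitSlash_ne_nil cs)
  | cons p ps => simp [consHead]

def myjoin (parts : List (List Char)) : List Char := PySem.Chars.join ['/'] parts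

theorem myjoin_singleton (a : List Char) : myjoin [a] = a := by
  simp [myjoin, PySem.Chars.join, List.intercalate]

theorem myjoin_cons₂ (a b : List Char) (t : List (List Char)) :
    myjoin (a :: b :: t) = a ++ '/' :: myjoin (b :: t) := by
  simp [myjoin, PySem.Chars.join, List.intercalate, List.intersperse_cons₂]

theorem myjoin_splitSlash (cs : List Char) : myjoin (splitSlash cs) = cs := by
  induction cs with
  | nil => simp [splitSlash, myjoin_singleton]
  | cons c rest ih =>
    simp only [splitSlash]
    split_ifs with hc
    · subst hc
      cases h : splitSlash rest with
      | nil => exact absurd h (splitSlash_ne_nil rest)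
      | cons p ps => rw [myjoin_cons₂]; rw [h] at ih; rw [ih]; simp
    · cases h : splitSlash rest with
      | nil => exact absurd h (splitSlash_ne_nil rest)
      | cons p ps =>
        rw [h] at ih
        cases ps with
        | nil => rw [myjoin_singleton] at ih ⊢; simp [ih]
        | cons q qs => rw [myjoin_cons₂] at ih ⊢; simp [ih]

theorem splitSlash_length_pos (cs : List Char) : 0 < (splitSlash cs).length :=
  List.length_pos_iff.mpr (splitSlash_ne_nil cs)

theorem myjoin_len_cons (c : Char) (p : List Char) (t : List (List Char)) :
    (myjoin ((c :: p) :: t)).length = (myjoin (p :: t)).length + 1 := by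
  cases t with
  | nil => simp [myjoin_singleton]
  | cons q qs => rw [myjoin_cons₂, myjoin_cons₂]; simp

-- characterization of A's scan in terms of splitSlash
theorem scan_spec (cs : List Char) (i cnt : Nat) (h : cnt ≤ 2) :
    (if 3 - cnt + 1 ≤ (splitSlash cs).length then
        scanThird cs i cnt = some (i + (myjoin ((splitSlash cs).take (3 - cnt))).length)
     else scanThird cs i cnt = none) := by
  induction cs generalizing i cnt with
  | nil =>
    have hc : ¬ (3 - cnt + 1 ≤ (splitSlash ([] : List Char)).length) := by
      simp [splitSlash]; omega
    simp only [if_neg hc, scanThird]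
  | cons c rest ih =>
    have hpos := splitSlash_length_pos rest
    by_cases hc : c = '/'
    · subst hc
      by_cases h2 : cnt = 2
      · subst h2
        have hcond : 3 - 2 + 1 ≤ (splitSlash ('/' :: rest)).length := by
          simp only [splitSlash, if_true, List.length_cons]; omega
        rw [if_pos hcond]
        simp only [splitSlash, if_true, scanThird]
        norm_num
        cases hsp : splitSlash rest with
        | nil => exact absurd hsp (splitSlash_ne_nil rest)
        | cons p ps => simp [myjoin_singleton]
      · have h1 : cnt ≤ 1 := by omega
        have hstep : scanThird ('/' :: rest) i cnt = scanThird rest (i + 1) (cnt + 1) := by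
          simp only [scanThird, if_true]
          rw [if_neg (by omega)]
        have ih' := ih (i + 1) (cnt + 1) (by omega)
        simp only [splitSlash, if_true, List.length_cons]
        by_cases hcond : 3 - cnt + 1 ≤ (splitSlash rest).length + 1
        · have hcond' : 3 - (cnt + 1) + 1 ≤ (splitSlash rest).length := by omega
          rw [if_pos hcond'] at ih'
          rw [if_pos hcond, hstep, ih']
          have htk : (3 - cnt) = (3 - (cnt + 1)) + 1 := by omega
          rw [htk, List.take_succ_cons]
          cases htk2 : (splitSlash rest).take (3 - (cnt + 1)) with
          | nil =>
            exfalso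
            have : (splitSlash rest).take (3 - (cnt + 1)) ≠ [] := by
              apply List.ne_nil_of_length_pos
              rw [List.length_take]
              have : 1 ≤ 3 - (cnt + 1) := by omega
              omega
            exact this htk2
          | cons q qs =>
            rw [myjoin_cons₂]
            simp only [Option.some.injEq]
            simp; omega
        · have hcond' : ¬ (3 - (cnt + 1) + 1 ≤ (splitSlash rest).length) := by omega
          rw [if_neg hcond'] at ih'
          rw [if_neg hcond, hstep]; exact ih'
    · have hstep : scanThird (c :: rest) i cnt = scanThird rest (i + 1) cnt := by
        simp only [scanThird, if_neg hc]
        rw [if_neg (by omega)]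
      have ih' := ih (i + 1) cnt h
      simp only [splitSlash, if_neg hc]
      cases hsp : splitSlash rest with
      | nil => exact absurd hsp (splitSlash_ne_nil rest)
      | cons p ps =>
        rw [hsp] at ih'
        simp only [List.length_cons] at ih' ⊢
        by_cases hcond : 3 - cnt + 1 ≤ ps.length + 1
        · rw [if_pos hcond] at ih' ⊢
          rw [hstep, ih']
          have htk : ∃ m, 3 - cnt = m + 1 := ⟨2 - cnt, by omega⟩
          obtain ⟨m, hm⟩ := htk
          rw [hm, List.take_succ_cons, List.take_succ_cons]
          rw [myjoin_len_cons]
          simp only [Option.some.injEq]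
          omega
        · rw [if_neg hcond] at ih' ⊢
          rw [hstep]; exact ih'

theorem take_prefix_slash (X R : List Char) :
    (X ++ '/' :: R).take (X.length + 1) = X ++ ['/'] := by
  rw [List.take_append]
  rw [List.take_of_length_le (by omega)]
  simp

theorem main_equiv (url : String) (hpre : url ≠ "") :
    get_root_url url = get_root_url_alt url := by
  have hne : url.toList ≠ [] := by simp_all
  have hslash : ("/" : String).toList = ['/'] := by decide
  unfold get_root_url get_root_url_alt append_slashes_at_end
  have hsplit : PySem.Str.split? url "/" = some ((splitSlash url.toList).map String.ofList) := by
    rw [PySem.Str.split?, hslash, PySem.Chars.split?]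
    simp [splitOn_eq]
  rw [hsplit]
  have hjoin : ∀ xs : List (List Char),
      (PySem.Str.join "/" (xs.map String.ofList)).toList = myjoin xs := by
    intro xs
    rw [PySem.Str.join, hslash]
    simp [String.toList_ofList, myjoin, Function.comp_def]
  have hP := scan_spec url.toList 0 0 (by omega)
  by_cases hlen : 4 ≤ (splitSlash url.toList).length
  · rw [if_pos (show 3 - 0 + 1 ≤ (splitSlash url.toList).length by omega)] at hP
    rw [hP]
    simp only [List.length_map, if_pos hlen, Nat.zero_add, ← List.map_take, hjoin]
    congr 1
    rcases hsp : splitSlash url.toList with _ | ⟨p0, _ | ⟨p1, _ | ⟨p2, _ | ⟨p3, ps⟩⟩⟩⟩ <;>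
      rw [hsp] at hlen <;> simp at hlen
    rw [show (3 - 0) = 3 from rfl,
        show List.take 3 (p0 :: p1 :: p2 :: p3 :: ps) = [p0, p1, p2] from rfl]
    have hcseq : url.toList = myjoin [p0, p1, p2] ++ '/' :: myjoin (p3 :: ps) := by
      conv_lhs => rw [← myjoin_splitSlash url.toList, hsp]
      simp [myjoin_cons₂, myjoin_singleton, List.append_assoc]
    conv_lhs => rw [hcseq]
    exact take_prefix_slash _ _
  · rw [if_neg (show ¬ (3 - 0 + 1 ≤ (splitSlash url.toList).length) by omega)] at hP
    rw [hP]
    simp only [List.length_map, if_neg hlen]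
    rcases List.eq_nil_or_concat url.toList with hnil | ⟨ds, d, hconc⟩
    · exact absurd hnil hne
    rw [List.concat_eq_append] at hconc
    have hget : PySem.Str.pyGet? url (-1) = some d := by
      rw [PySem.Str.pyGet?_eq]
      simp [PySem.Chars.pyGet?, PySem.List.pyGet?, PySem.List.pyIdx?, hconc]
    have hends : PySem.Str.endswith url "/" = ('/' == d) := by
      rw [PySem.Str.endswith_eq, hslash, hconc]
      simp [PySem.Chars.endswith, List.isSuffixOf, List.isPrefixOf]
    rw [hget, hends]
    by_cases hd : d = '/'
    · subst hd; simp
    · have hbeq : ('/' == d) = false := by simp [Ne.symm hd]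
      simp [hbeq, hd]

-- ===== VERDICT (by name: the statement is the Claim_ definition above) =====
theorem get_root_url_spec : Claim_equal_get_root_url := by
  intro url _ hpre
  exact main_equiv url hpre

theorem get_root_url_raises : Claim_raises_get_root_url := by
  unfold Claim_raises_get_root_url
  exact ⟨by intro url _ hr hp; exact hp hr, by decide⟩

-- witness self-check: the raise witness really lies inside Raises_ (read off the raises theorem)
theorem pvRaiseWitness_in_Raises_ok : Raises_get_root_url pvRaiseWitness_get_root_url :=
  get_root_url_raises.2.2.1
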